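-- pv_equiv track=rewrite | github.com/ShapeLayer/training | tasks/programmers/algorithm/python/5.fullsearch/1.py | solution
-- ===== SOURCE A (Python) =====
-- def solution(answers):
--     cnt1, cnt2, cnt3, pnt = 0, 0, 0, [0, 0, 0]
--     ans1, ans2, ans3 = [1, 2, 3, 4, 5], [2, 1, 2, 3, 2, 4, 2, 5], [3, 3, 1, 1, 2, 2, 4, 4, 5, 5]
--     for ans in answers:
--         if ans == ans1[cnt1]:
--             pnt[0] += 1
--         if ans == ans2[cnt2]:
--             pnt[1] += 1
--         if ans == ans3[cnt3]:
--             pnt[2] += 1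
--         if cnt1 == 4:
--             cnt1 = 0
--         else:
--             cnt1 += 1
--         if cnt2 == 7:
--             cnt2 = 0
--         else:
--             cnt2 += 1
--         if cnt3 == 9:
--             cnt3 = 0
--         else:
--             cnt3 += 1
--     answer = []
--     i = 0
--     for pn in pnt:
--         if pn == max(pnt):
--             answer += [i+1]
--         i += 1
--     return answer
-- ===== SOURCE B (Python) =====
-- def solution(answers):
--     patterns = [[1, 2, 3, 4, 5], [2, 1, 2, 3, 2, 4, 2, 5], [3, 3, 1, 1, 2, 2, 4, 4, 5, 5]]
--     scores = []
--     for p in patterns: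
--         tiled = (p * (len(answers) // len(p) + 1))[:len(answers)]
--         scores.append(sum(1 for a, b in zip(answers, tiled) if a == b))
--     best = max(scores)
--     return [i + 1 for i, s in enumerate(scores) if s == best]
-- ===== Notes on version B (the rewrite author's own statement) =====
-- stated objective: alternative
-- what changed: Instead of A's single interleaved pass with three manually wrapped cyclic counters, B materialises each supervisor's full repeated answer key as a tiled list (pattern * reps, truncated to the input length) and scores it by zipping it elementwise against the answers, then picks the winners from the score list.
import Mathlib
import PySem

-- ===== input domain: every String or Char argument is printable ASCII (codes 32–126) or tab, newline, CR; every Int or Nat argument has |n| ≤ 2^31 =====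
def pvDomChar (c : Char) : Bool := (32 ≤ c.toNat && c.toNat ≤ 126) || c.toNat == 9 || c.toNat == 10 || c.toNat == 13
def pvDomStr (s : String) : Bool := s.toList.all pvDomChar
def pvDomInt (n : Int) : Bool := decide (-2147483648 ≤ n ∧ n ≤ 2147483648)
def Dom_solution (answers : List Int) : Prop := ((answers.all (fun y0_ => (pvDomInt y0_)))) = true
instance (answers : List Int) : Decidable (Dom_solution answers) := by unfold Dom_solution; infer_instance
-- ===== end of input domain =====

-- B replaces A's single interleaved pass (three manually wrapped cyclic counters) by
-- materialising each supervisor's tiled answer-key list and scoring it with an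
-- elementwise zip against the answers (alternative decomposition; not faster).

-- ===== PORT A =====
def solution (answers : List Int) : List Int :=
  let ans1 : List Int := [1, 2, 3, 4, 5]
  let ans2 : List Int := [2, 1, 2, 3, 2, 4, 2, 5]
  let ans3 : List Int := [3, 3, 1, 1, 2, 2, 4, 4, 5, 5]
  let st := answers.foldl (fun (st : Int × Int × Int × Int × Int × Int) ans =>
    match st with
    | (c1, c2, c3, p1, p2, p3) =>
      let p1 := if some ans = PySem.List.pyGet? ans1 c1 then p1 + 1 else p1
      let p2 := if some ans = PySem.List.pyGet? ans2 c2 then p2 + 1 else p2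
      let p3 := if some ans = PySem.List.pyGet? ans3 c3 then p3 + 1 else p3
      let c1 := if c1 = 4 then 0 else c1 + 1
      let c2 := if c2 = 7 then 0 else c2 + 1
      let c3 := if c3 = 9 then 0 else c3 + 1
      (c1, c2, c3, p1, p2, p3)) (0, 0, 0, 0, 0, 0)
  let pnt : List Int := [st.2.2.2.1, st.2.2.2.2.1, st.2.2.2.2.2]
  (pnt.foldl (fun (acc : List Int × Int) pn =>
      (if some pn = PySem.List.max? pnt (fun x => x) then acc.1 ++ [acc.2 + 1] else acc.1,
       acc.2 + 1)) ([], 0)).1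

-- ===== PORT B =====
def solution_alt (answers : List Int) : List Int :=
  let patterns : List (List Int) :=
    [[1, 2, 3, 4, 5], [2, 1, 2, 3, 2, 4, 2, 5], [3, 3, 1, 1, 2, 2, 4, 4, 5, 5]]
  let scores : List Int := patterns.foldl (fun acc p =>
    let tiled := PySem.List.slice
      (PySem.List.pyRepeat p
        (PySem.Int.floordiv (answers.length : Int) (p.length : Int) + 1))
      none (some (answers.length : Int))
    acc ++ [((answers.zip tiled).countP (fun ab => ab.1 == ab.2) : Int)]) []
  match PySem.List.max? scores (fun x => x) with
  | none => []   -- unreachable: scores always has three elements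
  | some best =>
      ((PySem.List.enumerate scores).filter (fun is => is.2 == best)).map (fun is => is.1 + 1)

-- ===== PRECONDITION & SPEC =====
def Spec_solution (answers : List Int) (out : List Int) : Prop := out = solution_alt answers
instance (answers : List Int) (out : List Int) : Decidable (Spec_solution answers out) := by unfold Spec_solution; infer_instance

-- ===== CLAIM (what is proved, stated in full; the proofs are below) =====
def Claim_equal_solution : Prop := ∀ (answers : List Int), Dom_solution answers → Spec_solution answers (solution answers)

-- ===== LEMMAS AND PROOFS =====

-- reference count: matches of xs against pattern p cyclically, starting at position n
def pvCnt (p : List Int) : Nat → List Int → Int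
  | _, [] => 0
  | n, a :: xs =>
      (if some a = PySem.List.pyGet? p ((n % p.length : Nat) : Int) then 1 else 0)
        + pvCnt p (n + 1) xs

theorem pvLoopA (xs : List Int) : ∀ (n1 n2 n3 : Nat) (p1 p2 p3 : Int),
    xs.foldl (fun (st : Int × Int × Int × Int × Int × Int) (ans : Int) =>
      match st with
      | (c1, c2, c3, q1, q2, q3) =>
        let q1 := if some ans = PySem.List.pyGet? [1, 2, 3, 4, 5] c1 then q1 + 1 else q1
        let q2 := if some ans = PySem.List.pyGet? [2, 1, 2, 3, 2, 4, 2, 5] c2 then q2 + 1 else q2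
        let q3 := if some ans = PySem.List.pyGet? [3, 3, 1, 1, 2, 2, 4, 4, 5, 5] c3 then q3 + 1 else q3
        let c1 := if c1 = 4 then 0 else c1 + 1
        let c2 := if c2 = 7 then 0 else c2 + 1
        let c3 := if c3 = 9 then 0 else c3 + 1
        (c1, c2, c3, q1, q2, q3))
      (((n1 % 5 : Nat) : Int), ((n2 % 8 : Nat) : Int), ((n3 % 10 : Nat) : Int), p1, p2, p3)
    = ((((n1 + xs.length) % 5 : Nat) : Int), (((n2 + xs.length) % 8 : Nat) : Int),
       (((n3 + xs.length) % 10 : Nat) : Int),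
       p1 + pvCnt [1, 2, 3, 4, 5] n1 xs,
       p2 + pvCnt [2, 1, 2, 3, 2, 4, 2, 5] n2 xs,
       p3 + pvCnt [3, 3, 1, 1, 2, 2, 4, 4, 5, 5] n3 xs) := by
  induction xs with
  | nil => intro n1 n2 n3 p1 p2 p3; simp [pvCnt]
  | cons a xs ih =>
      intro n1 n2 n3 p1 p2 p3
      have hc1 : (if ((n1 % 5 : Nat) : Int) = 4 then (0 : Int) else ((n1 % 5 : Nat) : Int) + 1)
          = (((n1 + 1) % 5 : Nat) : Int) := by split_ifs with h <;> omega
      have hc2 : (if ((n2 % 8 : Nat) : Int) = 7 then (0 : Int) else ((n2 % 8 : Nat) : Int) + 1)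
          = (((n2 + 1) % 8 : Nat) : Int) := by split_ifs with h <;> omega
      have hc3 : (if ((n3 % 10 : Nat) : Int) = 9 then (0 : Int) else ((n3 % 10 : Nat) : Int) + 1)
          = (((n3 + 1) % 10 : Nat) : Int) := by split_ifs with h <;> omega
      simp only [List.foldl_cons]
      rw [hc1, hc2, hc3, ih]
      have h5 : ([1, 2, 3, 4, 5] : List Int).length = 5 := rfl
      have h8 : ([2, 1, 2, 3, 2, 4, 2, 5] : List Int).length = 8 := rfl
      have h10 : ([3, 3, 1, 1, 2, 2, 4, 4, 5, 5] : List Int).length = 10 := rfl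
      simp only [pvCnt, h5, h8, h10, List.length_cons, Prod.mk.injEq]
      refine ⟨by omega, by omega, by omega, ?_, ?_, ?_⟩ <;> · split_ifs <;> ring

-- element i of p repeated k times, i < k * |p|, is p[i % |p|]
theorem pvRepGet (p : List Int) : ∀ (k i : Nat), i < k * p.length →
    (PySem.List.pyRepeat p (k : Int))[i]? = p[i % p.length]? := by
  intro k
  induction k with
  | zero => intro i hi; rw [Nat.zero_mul] at hi; omega
  | succ k ih =>
      intro i hi
      rw [Nat.succ_mul] at hi
      have hrep : PySem.List.pyRepeat p ((k + 1 : Nat) : Int) = p ++ PySem.List.pyRepeat p (k : Int) := by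
        simp [PySem.List.pyRepeat, List.replicate_succ]
      rw [hrep]
      by_cases h : i < p.length
      · rw [List.getElem?_append_left h, Nat.mod_eq_of_lt h]
      · rw [List.getElem?_append_right (by omega)]
        rw [ih (i - p.length) (by omega)]
        have : (i - p.length) % p.length = i % p.length := by
          conv_rhs => rw [← Nat.sub_add_cancel (le_of_not_gt h)]
          rw [Nat.add_mod_right]
        rw [this]

-- zip-count against a list that looks up the cyclic pattern equals pvCnt
theorem pvZipCnt (p : List Int) (hp : 0 < p.length) : ∀ (xs ts : List Int) (n : Nat),
    (∀ i, i < xs.length → ts[i]? = p[(n + i) % p.length]?) →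
    ((xs.zip ts).countP (fun ab => ab.1 == ab.2) : Int) = pvCnt p n xs := by
  intro xs
  induction xs with
  | nil => intro ts n _; simp [pvCnt]
  | cons a xs ih =>
      intro ts n h
      have h0 := h 0 (by simp)
      rcases ts with _ | ⟨t, ts⟩
      · simp only [List.getElem?_nil, Nat.add_zero] at h0
        have h1 : p.length ≤ n % p.length := by
          have := h0.symm
          rwa [List.getElem?_eq_none_iff] at this
        have := Nat.mod_lt n hp
        omega
      · have ht : p[n % p.length]? = some t := by
          simpa [Nat.add_zero] using h0.symm
        have hrest : ∀ i, i < xs.length → ts[i]? = p[(n + 1 + i) % p.length]? := by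
          intro i hi
          have := h (i + 1) (by simpa using Nat.succ_lt_succ hi)
          simpa [List.getElem?_cons_succ, show n + (i + 1) = n + 1 + i by omega] using this
        rw [List.zip_cons_cons, List.countP_cons]
        push_cast
        rw [ih ts (n + 1) hrest]
        simp only [pvCnt, PySem.List.pyGet?_natCast, beq_iff_eq, ht, Option.some.injEq]
        split_ifs with hA <;> ring

-- B's tiled score is pvCnt from position 0
theorem pvTiled (p : List Int) (hp : 0 < p.length) (xs : List Int) :
    ((xs.zip (PySem.List.slice
        (PySem.List.pyRepeat p
          (PySem.Int.floordiv (xs.length : Int) (p.length : Int) + 1))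
        none (some (xs.length : Int)))).countP (fun ab => ab.1 == ab.2) : Int)
    = pvCnt p 0 xs := by
  set k : Nat := xs.length / p.length + 1 with hk
  have hcast : PySem.Int.floordiv (xs.length : Int) (p.length : Int) + 1 = (k : Int) := by
    rw [PySem.Int.floordiv_natCast]; push_cast [hk]; ring
  rw [hcast, PySem.List.slice_to_natCast]
  apply pvZipCnt p hp
  intro i hi
  rw [List.getElem?_take_of_lt hi]
  have hik : i < k * p.length := by
    have h1 := Nat.div_add_mod' xs.length p.length
    have h2 := Nat.mod_lt xs.length hp
    rw [hk, Nat.add_mul, Nat.one_mul]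
    omega
  rw [pvRepGet p k i hik, Nat.zero_add]

-- the selection loop over a 3-element list equals B's filter-of-enumerate
theorem pvSel (a b c : Int) :
    (([a, b, c] : List Int).foldl (fun (acc : List Int × Int) pn =>
        (if some pn = PySem.List.max? [a, b, c] (fun x => x) then acc.1 ++ [acc.2 + 1] else acc.1,
         acc.2 + 1)) ([], 0)).1
    = (match PySem.List.max? ([a, b, c] : List Int) (fun x => x) with
       | none => []
       | some best =>
           ((PySem.List.enumerate ([a, b, c] : List Int)).filter
               (fun is => is.2 == best)).map (fun is => is.1 + 1)) := by
  rcases h : PySem.List.max? ([a, b, c] : List Int) (fun x => x) with _ | m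
  · exact absurd ((PySem.List.max?_eq_none_iff _ _).mp h) (by simp)
  · simp only [List.foldl_cons, List.foldl_nil, PySem.List.enumerate_cons,
      PySem.List.enumerate_nil, List.filter_cons, List.filter_nil, beq_iff_eq,
      Option.some.injEq]
    norm_num
    split_ifs <;> simp_all

theorem solution_spec_total (answers : List Int) : solution answers = solution_alt answers := by
  unfold solution solution_alt
  simp only []
  have hA := pvLoopA answers 0 0 0 0 0 0
  simp only [Nat.zero_mod, Nat.cast_zero, zero_add] at hA
  rw [hA]
  simp only [List.foldl_cons, List.foldl_nil, List.nil_append, List.cons_append]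
  rw [pvTiled [1, 2, 3, 4, 5] (by decide) answers,
      pvTiled [2, 1, 2, 3, 2, 4, 2, 5] (by decide) answers,
      pvTiled [3, 3, 1, 1, 2, 2, 4, 4, 5, 5] (by decide) answers]
  exact pvSel _ _ _

-- ===== VERDICT (by name: the statement is the Claim_ definition above) =====
theorem solution_spec : Claim_equal_solution := by
  intro answers _
  exact solution_spec_total answers
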